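-- pv_equiv track=rewrite | github.com/Yosseulsin-JOB/algorithm-study-20.08 | 1차/윤형진_모의고사.py | solution
-- ===== SOURCE A (Python) =====
-- def solution(answers):
--     students_pattern = [[1, 2, 3, 4, 5], [2, 1, 2, 3, 2, 4, 2, 5], [3, 3, 1, 1, 2, 2, 4, 4, 5, 5]]
--     students_score = []
--     score = 0
--     winner = []
--     max_score = 0
--
--     for i in range(len(students_pattern)):
--         k = 0
--         score = 0
--
--         for j in range(len(answers)):
--
--             if k == len(students_pattern[i]):
--                 k = 0
--
--             if answers[j] == students_pattern[i][k]:
--                 score = score + 1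
--
--             k = k + 1
--
--         students_score.append(score)
--
--     max_score = max(students_score)
--
--     for i in range(len(students_score)):
--
--         if students_score[i] == max_score:
--             winner.append(i + 1)
--
--     answer = winner
--
--     return answer
-- ===== SOURCE B (Python) =====
-- def solution(answers):
--     patterns = [[1, 2, 3, 4, 5], [2, 1, 2, 3, 2, 4, 2, 5], [3, 3, 1, 1, 2, 2, 4, 4, 5, 5]]
--     # 40 = lcm(5, 8, 10): each pattern's expected value at position j depends only on j % 40.
--     # Pass 1 (pattern-free): histogram of (j % 40, answer) pairs.
--     hist = {}
--     for j, a in enumerate(answers):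
--         key = (j % 40, a)
--         hist[key] = hist.get(key, 0) + 1
--     # Pass 2: each pattern's score is 40 histogram lookups, independent of len(answers).
--     scores = [sum(hist.get((m, p[m % len(p)]), 0) for m in range(40)) for p in patterns]
--     best = max(scores)
--     return [i + 1 for i in range(3) if scores[i] == best]
-- ===== Notes on version B (the rewrite author's own statement) =====
-- stated objective: alternative
-- what changed: B never compares an answer against a pattern while scanning: it builds a histogram dict of (index mod 40, answer) pairs in one pattern-free pass (40 = lcm of the pattern lengths, so each pattern's expected value depends only on the index mod 40), then scores each pattern by summing 40 histogram lookups, instead of A's three passes that compare every answer to a resetting pattern cursor.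
import Mathlib
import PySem

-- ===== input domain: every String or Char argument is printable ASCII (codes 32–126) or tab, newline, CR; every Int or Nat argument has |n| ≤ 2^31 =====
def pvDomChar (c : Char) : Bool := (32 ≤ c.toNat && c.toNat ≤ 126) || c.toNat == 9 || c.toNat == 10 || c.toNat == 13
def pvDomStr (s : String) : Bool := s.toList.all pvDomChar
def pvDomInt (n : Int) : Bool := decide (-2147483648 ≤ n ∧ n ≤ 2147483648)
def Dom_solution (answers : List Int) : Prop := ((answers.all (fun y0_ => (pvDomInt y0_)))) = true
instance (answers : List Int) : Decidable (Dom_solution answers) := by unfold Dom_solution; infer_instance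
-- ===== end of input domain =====

-- B replaces A's per-answer pattern comparisons (three passes with a resetting cursor) by a
-- pattern-free histogram of (index mod 40, answer) pairs, scored by 40 dict lookups per pattern.

-- ===== PORT A =====
-- one step of A's inner loop: state (k, score), consuming answers[j]
def stepA (p : List Int) (st : Nat × Int) (a : Int) : Nat × Int :=
  let k := if st.1 = p.length then 0 else st.1          -- if k == len(pattern): k = 0
  let score := if a = p.getD k 0 then st.2 + 1 else st.2 -- k is always < len(pattern) here
  (k + 1, score)

def solution (answers : List Int) : List Int :=
  let students_pattern : List (List Int) :=
    [[1,2,3,4,5], [2,1,2,3,2,4,2,5], [3,3,1,1,2,2,4,4,5,5]]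
  -- for i in range(len(students_pattern)): append the inner-loop score for pattern i
  let students_score : List Int := students_pattern.foldl (fun acc p =>
    let res := (PySem.List.pyRange 0 (answers.length : Int) 1).foldl
      (fun st j => stepA p st (PySem.List.pyGetD answers j 0)) (0, 0)
    acc ++ [res.2]) []
  -- max(students_score); the list always has 3 elements, so max never raises
  let max_score := (PySem.List.max? students_score (fun x => x)).getD 0
  let winner := (PySem.List.pyRange 0 (students_score.length : Int) 1).foldl
    (fun acc i => if PySem.List.pyGetD students_score i 0 = max_score then acc ++ [i + 1] else acc) []
  winner

-- ===== PORT B =====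
def solution_alt (answers : List Int) : List Int :=
  let patterns : List (List Int) :=
    [[1,2,3,4,5], [2,1,2,3,2,4,2,5], [3,3,1,1,2,2,4,4,5,5]]
  -- hist[key] = hist.get(key, 0) + 1 for key = (j % 40, a)
  let hist := (PySem.List.enumerate answers 0).foldl
    (fun (h : PySem.Dict (Int × Int) Int) ja =>
      let key := (PySem.Int.mod ja.1 40, ja.2)
      h.insert key (h.getD key 0 + 1)) PySem.Dict.empty
  -- scores = [sum(hist.get((m, p[m % len(p)]), 0) for m in range(40)) for p in patterns]
  let scores := patterns.map (fun p =>
    ((PySem.List.pyRange 0 40 1).map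
      (fun m => hist.getD (m, PySem.List.pyGetD p (PySem.Int.mod m (PySem.List.len p)) 0) 0)).sum)
  let best := (PySem.List.max? scores (fun v => v)).getD 0
  ((PySem.List.pyRange 0 3 1).filter
    (fun i => PySem.List.pyGetD scores i 0 == best)).map (fun i => i + 1)

-- ===== PRECONDITION & SPEC =====
def Spec_solution (answers : List Int) (out : List Int) : Prop := out = solution_alt answers
instance (answers : List Int) (out : List Int) : Decidable (Spec_solution answers out) := by unfold Spec_solution; infer_instance

-- ===== CLAIM (what is proved, stated in full; the proofs are below) =====
def Claim_equal_solution : Prop := ∀ (answers : List Int), Dom_solution answers → Spec_solution answers (solution answers)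

-- ===== LEMMAS AND PROOFS =====

-- reference count for A: matches of the list against pattern p starting at cursor position e
def cntE (p : List Int) : Nat → List Int → Int
  | _, [] => 0
  | e, a :: rest => (if a = p.getD e 0 then 1 else 0) + cntE p ((e + 1) % p.length) rest

-- reference count for B: element at running index j matches p[j % len p]
def cntJ (p : List Int) : Nat → List Int → Int
  | _, [] => 0
  | j, a :: rest => (if a = p.getD (j % p.length) 0 then 1 else 0) + cntJ p (j + 1) rest

theorem foldA_eq (p : List Int) (hp : 0 < p.length) :
    ∀ (xs : List Int) (k : Nat) (s : Int), k ≤ p.length →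
      (xs.foldl (stepA p) (k, s)).2 = s + cntE p (if k = p.length then 0 else k) xs := by
  intro xs
  induction xs with
  | nil => intro k s _; simp [cntE]
  | cons a rest ih =>
    intro k s hk
    set e := (if k = p.length then 0 else k) with hE
    have he : e < p.length := by rw [hE]; split <;> omega
    have hstep : stepA p (k, s) a = (e + 1, if a = p.getD e 0 then s + 1 else s) := by
      simp [stepA, hE]
    rw [List.foldl_cons, hstep, ih _ _ (by omega)]
    have hm : (if e + 1 = p.length then 0 else e + 1) = (e + 1) % p.length := by
      by_cases h : e + 1 = p.length
      · simp [h]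
      · rw [if_neg h, Nat.mod_eq_of_lt (by omega)]
    rw [hm, cntE]
    split_ifs <;> ring

theorem foldA_top (p : List Int) (hp : 0 < p.length) (xs : List Int) :
    (xs.foldl (stepA p) ((0 : Nat), (0 : Int))).2 = cntE p 0 xs := by
  have h := foldA_eq p hp xs 0 0 (by omega)
  rw [h]
  have h0 : (if 0 = p.length then 0 else 0) = 0 := by split <;> omega
  rw [h0]; ring

theorem cntE_eq_cntJ (p : List Int) (hp : 1 < p.length) :
    ∀ (xs : List Int) (j : Nat), cntE p (j % p.length) xs = cntJ p j xs := by
  intro xs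
  induction xs with
  | nil => intro j; simp [cntE, cntJ]
  | cons a rest ih =>
    intro j
    rw [cntE, cntJ]
    have h1 : (j % p.length + 1) % p.length = (j + 1) % p.length := by
      conv_rhs => rw [Nat.add_mod, Nat.mod_eq_of_lt (show 1 < p.length from hp)]
    rw [h1, ih (j + 1)]

-- a sum over range(n) of an indicator concentrated at jm < n
theorem sum_range_single (c : Int) :
    ∀ (n jm : Nat), jm < n →
      ((List.range n).map (fun k => if k = jm then c else 0)).sum = c := by
  intro n
  induction n with
  | zero => intro jm h; omega
  | succ n ih =>
    intro jm h
    rw [List.range_succ, List.map_append, List.sum_append]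
    by_cases hj : jm = n
    · subst hj
      have hz : ((List.range jm).map (fun k => if k = jm then c else 0)).sum = 0 := by
        apply List.sum_eq_zero
        intro x hx
        simp only [List.mem_map, List.mem_range] at hx
        obtain ⟨k, hk, rfl⟩ := hx
        rw [if_neg (by omega)]
      rw [hz]; simp
    · have hz : ([n].map (fun k => if k = jm then c else 0)).sum = 0 := by
        simp only [List.map_cons, List.map_nil, List.sum_cons, List.sum_nil]
        rw [if_neg (fun hq => hj hq.symm)]; simp
      rw [hz, ih jm (by omega)]
      simp

theorem sum_map_single (c : Int) (n jm : Nat) (h : jm < n) :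
    ((PySem.List.pyRange 0 (n : Int) 1).map
      (fun m => if m = (jm : Int) then c else 0)).sum = c := by
  rw [PySem.List.pyRange_zero_natCast, List.map_map]
  have he : ((fun m => if m = (jm : Int) then c else 0) ∘ fun k : Nat => (k : Int))
      = fun k : Nat => if k = jm then c else 0 := by
    funext k
    simp only [Function.comp]
    by_cases hk : k = jm
    · subst hk; simp
    · rw [if_neg (by exact_mod_cast hk), if_neg hk]
  rw [he, sum_range_single c n jm h]

-- the key list B's histogram counts
def keyList (xs : List Int) (j : Nat) : List (Int × Int) :=
  (PySem.List.enumerate xs (j : Int)).map (fun ja => (PySem.Int.mod ja.1 40, ja.2))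

theorem sumB (p : List Int) (hd : p.length ∣ 40) :
    ∀ (xs : List Int) (j : Nat),
      ((PySem.List.pyRange 0 40 1).map
        (fun m => ((keyList xs j).count
          (m, PySem.List.pyGetD p (PySem.Int.mod m (p.length : Int)) 0) : Int))).sum
      = cntJ p j xs := by
  intro xs
  induction xs with
  | nil =>
    intro j
    simp [keyList, PySem.List.enumerate_nil, cntJ]
  | cons a rest ih =>
    intro j
    have hk : keyList (a :: rest) j =
        (((j % 40 : Nat) : Int), a) :: keyList rest (j + 1) := by
      simp [keyList, PySem.List.enumerate_cons]
    rw [hk]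
    have hcount : ∀ (m : Int),
        (((((j % 40 : Nat) : Int), a) :: keyList rest (j + 1)).count
          (m, PySem.List.pyGetD p (PySem.Int.mod m (p.length : Int)) 0) : Int)
        = ((keyList rest (j + 1)).count
            (m, PySem.List.pyGetD p (PySem.Int.mod m (p.length : Int)) 0) : Int)
          + (if m = ((j % 40 : Nat) : Int)
              then (if a = p.getD (j % p.length) 0 then (1 : Int) else 0) else 0) := by
      intro m
      rw [List.count_cons]
      by_cases hm : m = ((j % 40 : Nat) : Int)
      · subst hm
        have hpm : PySem.List.pyGetD p (PySem.Int.mod ((j % 40 : Nat) : Int) (p.length : Int)) 0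
            = p.getD (j % p.length) 0 := by
          rw [PySem.Int.mod_natCast, PySem.List.pyGetD_natCast,
            Nat.mod_mod_of_dvd j hd]
        rw [hpm]
        by_cases ha : a = p.getD (j % p.length) 0
        · subst ha; simp
        · have : ((((j % 40 : Nat) : Int), a) == (((j % 40 : Nat) : Int), p.getD (j % p.length) 0)) = false := by
            rw [beq_eq_false_iff_ne]
            intro hq; exact ha (congrArg Prod.snd hq)
          rw [this, if_pos rfl, if_neg ha]
          push_cast; ring
      · have : ((((j % 40 : Nat) : Int), a) ==
            (m, PySem.List.pyGetD p (PySem.Int.mod m (p.length : Int)) 0)) = false := by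
          rw [beq_eq_false_iff_ne]
          intro hq; exact hm (congrArg Prod.fst hq).symm
        rw [this, if_neg hm]
        push_cast; ring
    have hmapeq : (PySem.List.pyRange 0 40 1).map
        (fun m => (((((j % 40 : Nat) : Int), a) :: keyList rest (j + 1)).count
          (m, PySem.List.pyGetD p (PySem.Int.mod m (p.length : Int)) 0) : Int))
      = (PySem.List.pyRange 0 40 1).map
        (fun m => ((keyList rest (j + 1)).count
            (m, PySem.List.pyGetD p (PySem.Int.mod m (p.length : Int)) 0) : Int)
          + (if m = ((j % 40 : Nat) : Int)
              then (if a = p.getD (j % p.length) 0 then (1 : Int) else 0) else 0)) := by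
      exact List.map_congr_left (fun m _ => hcount m)
    rw [hmapeq, PySem.List.sum_map_add_int, ih (j + 1)]
    have h40 : ((40 : Nat) : Int) = (40 : Int) := by norm_num
    have hs := sum_map_single (if a = p.getD (j % p.length) 0 then (1 : Int) else 0)
      40 (j % 40) (Nat.mod_lt _ (by omega))
    rw [h40] at hs
    rw [hs, cntJ]
    ring

-- the winner-selection parts agree on any concrete triple of scores
theorem winners_eq (x y z : Int) :
    (PySem.List.pyRange 0 (([x, y, z] : List Int).length : Int) 1).foldl
      (fun acc i =>
        if PySem.List.pyGetD [x, y, z] i 0 = (PySem.List.max? [x, y, z] (fun v => v)).getD 0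
        then acc ++ [i + 1] else acc) [] =
    ((PySem.List.pyRange 0 3 1).filter
      (fun i => PySem.List.pyGetD [x, y, z] i 0 == (PySem.List.max? [x, y, z] (fun v => v)).getD 0)).map
      (fun i => i + 1) := by
  have hr : PySem.List.pyRange 0 ((3 : Nat) : Int) 1 = [0, 1, 2] := by decide
  have hr3 : PySem.List.pyRange 0 (3 : Int) 1 = [0, 1, 2] := by decide
  have g0 : PySem.List.pyGetD [x,y,z] 0 0 = x := by rfl
  have g1 : PySem.List.pyGetD [x,y,z] 1 0 = y := by rfl
  have g2 : PySem.List.pyGetD [x,y,z] 2 0 = z := by rfl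
  simp only [List.length_cons, List.length_nil, hr, hr3, List.foldl,
    g0, g1, g2, List.filter_cons, List.filter_nil, beq_iff_eq]
  split_ifs <;> norm_num

-- ===== VERDICT (by name: the statement is the Claim_ definition above) =====
theorem solution_spec : Claim_equal_solution := by
  intro answers _
  unfold Spec_solution solution solution_alt
  have hA : ∀ (p : List Int), (PySem.List.pyRange 0 ((answers.length : Nat) : Int) 1).foldl
      (fun st j => stepA p st (PySem.List.pyGetD answers j 0)) ((0 : Nat), (0 : Int))
      = answers.foldl (stepA p) (0, 0) := fun p =>
    PySem.List.foldl_pyRange_zero_pyGetD' answers 0 (stepA p) (0, 0)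
  have hHist : (PySem.List.enumerate answers 0).foldl
      (fun (h : PySem.Dict (Int × Int) Int) ja =>
        let key := (PySem.Int.mod ja.1 40, ja.2)
        h.insert key (h.getD key 0 + 1)) PySem.Dict.empty
      = PySem.Dict.counter (keyList answers 0) := by
    rw [keyList, ← PySem.Dict.foldl_insert_getD_add_one_eq_counter, List.foldl_map]
    simp
  have hScore : ∀ (p : List Int), p.length ∣ 40 →
      ((PySem.List.pyRange 0 40 1).map
        (fun m => (PySem.Dict.counter (keyList answers 0)).getD
          (m, PySem.List.pyGetD p (PySem.Int.mod m (PySem.List.len p)) 0) 0)).sum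
      = cntJ p 0 answers := by
    intro p h2
    have := sumB p h2 answers 0
    simp only [PySem.List.len_eq] at *
    rw [← this]
    congr 1
    exact List.map_congr_left (fun m _ => PySem.Dict.getD_counter _ _)
  have c1 : cntE [1,2,3,4,5] 0 answers = cntJ [1,2,3,4,5] 0 answers := by
    have := cntE_eq_cntJ [1,2,3,4,5] (by decide) answers 0
    simpa using this
  have c2 : cntE [2,1,2,3,2,4,2,5] 0 answers = cntJ [2,1,2,3,2,4,2,5] 0 answers := by
    have := cntE_eq_cntJ [2,1,2,3,2,4,2,5] (by decide) answers 0
    simpa using this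
  have c3 : cntE [3,3,1,1,2,2,4,4,5,5] 0 answers = cntJ [3,3,1,1,2,2,4,4,5,5] 0 answers := by
    have := cntE_eq_cntJ [3,3,1,1,2,2,4,4,5,5] (by decide) answers 0
    simpa using this
  simp only [List.foldl_cons, List.foldl_nil, List.nil_append, List.cons_append, List.map_cons,
    List.map_nil, hA, hHist,
    foldA_top [1,2,3,4,5] (by decide), foldA_top [2,1,2,3,2,4,2,5] (by decide),
    foldA_top [3,3,1,1,2,2,4,4,5,5] (by decide),
    hScore [1,2,3,4,5] (by decide),
    hScore [2,1,2,3,2,4,2,5] (by decide),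
    hScore [3,3,1,1,2,2,4,4,5,5] (by decide),
    c1, c2, c3]
  exact winners_eq _ _ _
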